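-- pv_equiv track=rewrite | github.com/nilc-icmc/web_portparser | web_portparser/portTokenizer/portTok.py | nextName
-- ===== SOURCE A (Python) =====
-- def nextName(name):
--     # increment the digits from right to left
--     ans = ""
--     while name != "":
--         digit, name = name[-1], name[:-1]
--         if digit == "9":
--             ans = "0" + ans
--         elif digit == "8":
--             ans = "9" + ans
--             return name+ans
--         elif digit == "7":
--             ans = "8" + ans
--             return name+ans
--         elif digit == "6":
--             ans = "7" + ans
--             return name+ans
--         elif digit == "5":
--             ans = "6" + ans
--             return name+ans
--         elif digit == "4":
--             ans = "5" + ans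
--             return name+ans
--         elif digit == "3":
--             ans = "4" + ans
--             return name+ans
--         elif digit == "2":
--             ans = "3" + ans
--             return name+ans
--         elif digit == "1":
--             ans = "2" + ans
--             return name+ans
--         elif digit == "0":
--             ans = "1" + ans
--             return name+ans
--         else:
--             ans = "1" + ans
--             return name+ans
--     return "overflow"+ans
-- ===== SOURCE B (Python) =====
-- def nextName(name):
--     stripped = name.rstrip('9')
--     zeros = '0' * (len(name) - len(stripped))
--     if stripped == '':
--         return 'overflow' + zeros
--     c = stripped[-1]
--     inc = chr(ord(c) + 1) if c in '012345678' else '1'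
--     return stripped[:-1] + inc + zeros
-- ===== Notes on version B (the rewrite author's own statement) =====
-- stated objective: simpler
-- what changed: replaces the per-character right-to-left carry loop with a single trailing-'9'-run detection (rstrip) plus slice/multiply construction of the result
import Mathlib
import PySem

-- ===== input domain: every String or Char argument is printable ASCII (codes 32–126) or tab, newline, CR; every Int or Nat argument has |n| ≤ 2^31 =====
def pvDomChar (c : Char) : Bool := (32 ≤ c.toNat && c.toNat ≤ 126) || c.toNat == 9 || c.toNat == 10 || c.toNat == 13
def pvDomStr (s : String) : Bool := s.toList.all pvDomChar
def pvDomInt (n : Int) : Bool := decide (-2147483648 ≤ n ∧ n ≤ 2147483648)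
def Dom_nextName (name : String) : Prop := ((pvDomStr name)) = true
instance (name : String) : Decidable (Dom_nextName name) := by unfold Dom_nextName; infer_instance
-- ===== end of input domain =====

-- ===== PORT A =====
-- B replaces A's per-character carry loop by trailing-'9'-run detection plus slicing (objective: simpler).
-- loop over the characters of name, taken from the right (digit = name[-1], name = name[:-1]);
-- r is the not-yet-consumed front part reversed, ans the accumulator.
def nextNameLoop : List Char → List Char → String
  | [], ans => "overflow" ++ String.mk ans
  | d :: rest, ans =>
    if d = '9' then nextNameLoop rest ('0' :: ans)
    else if d = '8' then String.mk (rest.reverse ++ '9' :: ans)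
    else if d = '7' then String.mk (rest.reverse ++ '8' :: ans)
    else if d = '6' then String.mk (rest.reverse ++ '7' :: ans)
    else if d = '5' then String.mk (rest.reverse ++ '6' :: ans)
    else if d = '4' then String.mk (rest.reverse ++ '5' :: ans)
    else if d = '3' then String.mk (rest.reverse ++ '4' :: ans)
    else if d = '2' then String.mk (rest.reverse ++ '3' :: ans)
    else if d = '1' then String.mk (rest.reverse ++ '2' :: ans)
    else if d = '0' then String.mk (rest.reverse ++ '1' :: ans)
    else String.mk (rest.reverse ++ '1' :: ans)

def nextName (name : String) : String := nextNameLoop name.toList.reverse []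

-- ===== PORT B =====
-- inc = chr(ord(c) + 1) if c in '012345678' else '1'
def nextNameInc (c : Char) : Char :=
  if c ∈ ['0','1','2','3','4','5','6','7','8'] then Char.ofNat (c.toNat + 1) else '1'

-- stripped = name.rstrip('9') is represented reversed: rs = reverse of stripped,
-- so stripped[-1] is rs' head and stripped[:-1] is the reverse of its tail.
def nextName_alt (name : String) : String :=
  let l := name.toList
  let rs := l.reverse.dropWhile (fun c => c == '9')
  let zeros := List.replicate (l.length - rs.length) '0'
  match rs with
  | [] => "overflow" ++ String.mk zeros
  | c :: rest => String.mk (rest.reverse ++ nextNameInc c :: zeros)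

-- ===== PRECONDITION & SPEC =====
def Spec_nextName (name : String) (out : String) : Prop := out = nextName_alt name
instance (name : String) (out : String) : Decidable (Spec_nextName name out) := by unfold Spec_nextName; infer_instance

-- ===== CLAIM (what is proved, stated in full; the proofs are below) =====
def Claim_equal_nextName : Prop := ∀ (name : String), Dom_nextName name → Spec_nextName name (nextName name)

-- ===== LEMMAS AND PROOFS =====

-- key lemma: the carry loop equals the run-detection form, for any accumulator
theorem nextNameLoop_eq (r ans : List Char) :
    nextNameLoop r ans =
      (match r.dropWhile (fun c => c == '9') with
       | [] => "overflow" ++ String.mk (List.replicate (r.length - (r.dropWhile (fun c => c == '9')).length) '0' ++ ans)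
       | c :: rest => String.mk (rest.reverse ++ nextNameInc c :: (List.replicate (r.length - (r.dropWhile (fun c => c == '9')).length) '0' ++ ans))) := by
  induction r generalizing ans with
  | nil => simp [nextNameLoop]
  | cons d rest ih =>
    by_cases h9 : d = '9'
    · subst h9
      have hle := List.length_dropWhile_le (fun c => c == '9') rest
      have harith : rest.length + 1 - (rest.dropWhile (fun c => c == '9')).length
          = (rest.length - (rest.dropWhile (fun c => c == '9')).length) + 1 := by omega
      simp only [nextNameLoop, if_pos rfl, ih, List.dropWhile_cons,
        (by decide : (('9' : Char) == '9') = true), if_true, List.length_cons, harith,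
        List.replicate_succ']
      cases hc : rest.dropWhile (fun c => c == '9') <;>
        simp [hc, List.append_assoc]
    · have hd : ((d == '9') = false) := by simp [h9]
      simp only [List.dropWhile_cons, hd, if_false, List.length_cons, Nat.sub_self,
        List.replicate_zero, List.nil_append, Bool.false_eq_true]
      simp only [nextNameLoop, if_neg h9]
      by_cases h : d = '8'; · subst h; simp [nextNameInc, (by decide : Char.ofNat ('8'.toNat + 1) = '9')]
      simp only [if_neg h]
      by_cases h7 : d = '7'; · subst h7; simp [nextNameInc, (by decide : Char.ofNat ('7'.toNat + 1) = '8')]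
      simp only [if_neg h7]
      by_cases h6 : d = '6'; · subst h6; simp [nextNameInc, (by decide : Char.ofNat ('6'.toNat + 1) = '7')]
      simp only [if_neg h6]
      by_cases h5 : d = '5'; · subst h5; simp [nextNameInc, (by decide : Char.ofNat ('5'.toNat + 1) = '6')]
      simp only [if_neg h5]
      by_cases h4 : d = '4'; · subst h4; simp [nextNameInc, (by decide : Char.ofNat ('4'.toNat + 1) = '5')]
      simp only [if_neg h4]
      by_cases h3 : d = '3'; · subst h3; simp [nextNameInc, (by decide : Char.ofNat ('3'.toNat + 1) = '4')]
      simp only [if_neg h3]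
      by_cases h2 : d = '2'; · subst h2; simp [nextNameInc, (by decide : Char.ofNat ('2'.toNat + 1) = '3')]
      simp only [if_neg h2]
      by_cases h1 : d = '1'; · subst h1; simp [nextNameInc, (by decide : Char.ofNat ('1'.toNat + 1) = '2')]
      simp only [if_neg h1]
      by_cases h0 : d = '0'; · subst h0; simp [nextNameInc, (by decide : Char.ofNat ('0'.toNat + 1) = '1')]
      simp only [if_neg h0]
      have hinc : nextNameInc d = '1' := by
        unfold nextNameInc
        rw [if_neg]
        intro hmem
        fin_cases hmem <;> simp_all
      rw [hinc]

-- ===== VERDICT (by name: the statement is the Claim_ definition above) =====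
theorem nextName_spec : Claim_equal_nextName := by
  intro name _
  unfold Spec_nextName nextName nextName_alt
  simp only [nextNameLoop_eq]
  cases hc : name.toList.reverse.dropWhile (fun c => c == '9') <;>
    simp [hc]
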